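-- pv_equiv track=rewrite | github.com/s0ca/C00merFucker | main.py | split_counts_by_url
-- ===== SOURCE A (Python) =====
-- from typing import List, Dict, Any, Optional
--
-- VIDEO_EXTS = (".mp4", ".webm", ".mov", ".mkv", ".m4v")
--
-- IMAGE_EXTS = (".jpg", ".jpeg", ".png", ".webp", ".gif")
--
-- MEDIA_VIDEO = "video"
--
-- MEDIA_IMAGE = "image"
--
-- MEDIA_OTHER = "other"
--
-- def media_type_from_url(url: str) -> str:
--     u = (url or "").lower().split("?", 1)[0]
--     if u.endswith(VIDEO_EXTS):
--         return MEDIA_VIDEO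
--     if u.endswith(IMAGE_EXTS):
--         return MEDIA_IMAGE
--     return MEDIA_OTHER
--
-- def split_counts_by_url(items: List[dict]) -> dict:
--     c = {"video": 0, "image": 0, "other": 0, "total": 0}
--     for it in items:
--         url = it.get("url") or ""
--         t = media_type_from_url(url)
--         if t == "video":
--             c["video"] += 1
--         elif t == "image":
--             c["image"] += 1
--         else:
--             c["other"] += 1
--         c["total"] += 1
--     return c
-- ===== SOURCE B (Python) =====
-- from typing import List, Dict, Any, Optional
--
-- VIDEO_EXTS = (".mp4", ".webm", ".mov", ".mkv", ".m4v")
-- IMAGE_EXTS = (".jpg", ".jpeg", ".png", ".webp", ".gif")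
--
-- def split_counts_by_url(items):
--     # Normalise each url the way the classifier would see it (lowercase, query stripped),
--     # then count video/image suffix matches directly; the suffix sets are mutually
--     # exclusive (no extension is a suffix of another), so "other" is the complement.
--     paths = [(it.get("url") or "").lower().split("?", 1)[0] for it in items]
--     v = sum(1 for p in paths if p.endswith(VIDEO_EXTS))
--     i = sum(1 for p in paths if p.endswith(IMAGE_EXTS))
--     return {"video": v, "image": i, "other": len(paths) - v - i, "total": len(paths)}
-- ===== Notes on version B (the rewrite author's own statement) =====
-- stated objective: alternative
-- what changed: Drops the per-item classifier and if/elif tally entirely: B counts video and image suffix matches directly on the normalised urls and derives 'other' arithmetically as the complement (len - video - image), which is valid because no video extension is a suffix of an image extension or vice versa.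
import Mathlib
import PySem

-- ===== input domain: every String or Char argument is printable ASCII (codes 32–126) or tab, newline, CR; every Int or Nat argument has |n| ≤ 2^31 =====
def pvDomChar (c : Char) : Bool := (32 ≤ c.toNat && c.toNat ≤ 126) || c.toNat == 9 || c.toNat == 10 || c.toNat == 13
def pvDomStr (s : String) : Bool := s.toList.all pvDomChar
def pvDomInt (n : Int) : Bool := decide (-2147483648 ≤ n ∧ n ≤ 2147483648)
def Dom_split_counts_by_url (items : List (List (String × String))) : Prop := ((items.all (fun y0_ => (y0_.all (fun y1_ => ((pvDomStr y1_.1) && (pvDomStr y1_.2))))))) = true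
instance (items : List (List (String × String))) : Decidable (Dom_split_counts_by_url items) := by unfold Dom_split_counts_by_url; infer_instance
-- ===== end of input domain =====

-- B drops A's per-item classifier and if/elif tally: it counts video and image suffix matches
-- directly and derives "other" arithmetically as the complement (alternative decomposition, same O(n)).

-- ===== PORT A =====
def VIDEO_EXTS : List String := [".mp4", ".webm", ".mov", ".mkv", ".m4v"]
def IMAGE_EXTS : List String := [".jpg", ".jpeg", ".png", ".webp", ".gif"]

def media_type_from_url (url : String) : String :=
  let u := ((PySem.Str.splitMax? (PySem.Str.lower url) "?" 1).getD []).headD ""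
  if VIDEO_EXTS.any (fun e => PySem.Str.endswith u e) then "video"
  else if IMAGE_EXTS.any (fun e => PySem.Str.endswith u e) then "image"
  else "other"

def split_counts_by_url (items : List (List (String × String))) : List (String × Int) :=
  let c : PySem.Dict String Int :=
    PySem.Dict.ofList [("video", 0), ("image", 0), ("other", 0), ("total", 0)]
  let c := items.foldl (fun c it =>
    let url := ((PySem.Dict.mk it).get? "url").getD ""
    let t := media_type_from_url url
    let c :=
      if t == "video" then c.modify "video" 0 (· + 1)
      else if t == "image" then c.modify "image" 0 (· + 1)
      else c.modify "other" 0 (· + 1)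
    c.modify "total" 0 (· + 1)) c
  c.items

-- ===== PORT B =====
-- (it.get("url") or "").lower().split("?", 1)[0]
def pathOf (it : List (String × String)) : String :=
  ((PySem.Str.splitMax? (PySem.Str.lower (((PySem.Dict.mk it).get? "url").getD "")) "?" 1).getD []).headD ""

def split_counts_by_url_alt (items : List (List (String × String))) : List (String × Int) :=
  let paths := items.map pathOf
  let v : Int := (paths.countP (fun p => VIDEO_EXTS.any (fun e => PySem.Str.endswith p e)) : Nat)
  let i : Int := (paths.countP (fun p => IMAGE_EXTS.any (fun e => PySem.Str.endswith p e)) : Nat)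
  [("video", v), ("image", i),
   ("other", (paths.length : Int) - v - i), ("total", (paths.length : Int))]

-- ===== PRECONDITION & SPEC =====
def Spec_split_counts_by_url (items : List (List (String × String))) (out : List (String × Int)) : Prop := out = split_counts_by_url_alt items
instance (items : List (List (String × String))) (out : List (String × Int)) : Decidable (Spec_split_counts_by_url items out) := by unfold Spec_split_counts_by_url; infer_instance

-- ===== CLAIM (what is proved, stated in full; the proofs are below) =====
def Claim_equal_split_counts_by_url : Prop := ∀ (items : List (List (String × String))), Dom_split_counts_by_url items → Spec_split_counts_by_url items (split_counts_by_url items)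

-- ===== LEMMAS AND PROOFS =====

def isV (p : String) : Bool := VIDEO_EXTS.any (fun e => PySem.Str.endswith p e)
def isI (p : String) : Bool := IMAGE_EXTS.any (fun e => PySem.Str.endswith p e)

theorem media_eq (url : String) :
    media_type_from_url url
      = (if isV (((PySem.Str.splitMax? (PySem.Str.lower url) "?" 1).getD []).headD "") then "video"
         else if isI (((PySem.Str.splitMax? (PySem.Str.lower url) "?" 1).getD []).headD "") then "image"
         else "other") := rfl

theorem suffix_getLast? {l₁ l₂ : List Char} (h : l₁ <:+ l₂) (hne : l₁ ≠ []) :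
    l₂.getLast? = l₁.getLast? := by
  obtain ⟨t, rfl⟩ := h
  rw [List.getLast?_append_of_ne_nil]; exact hne

theorem ends_getLast (p e : String) (h : PySem.Str.endswith p e = true) (hne : e.toList ≠ []) :
    p.toList.getLast? = e.toList.getLast? := by
  rw [PySem.Str.endswith_eq] at h
  exact suffix_getLast? ((PySem.Chars.endswith_iff _ _).mp h) hne

-- no video extension shares a last character with an image extension, so the two tests are disjoint
theorem disjVI (p : String) (hv : isV p = true) : isI p = false := by
  by_contra hI
  rw [Bool.not_eq_false] at hI
  simp only [isV, VIDEO_EXTS, List.any_cons, List.any_nil, Bool.or_false, Bool.or_eq_true] at hv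
  simp only [isI, IMAGE_EXTS, List.any_cons, List.any_nil, Bool.or_false, Bool.or_eq_true] at hI
  have hV' : p.toList.getLast? = some '4' ∨ p.toList.getLast? = some 'm' ∨ p.toList.getLast? = some 'v' := by
    rcases hv with h | h | h | h | h <;>
      [exact Or.inl (ends_getLast p _ h (by decide));
       exact Or.inr (Or.inl (ends_getLast p _ h (by decide)));
       exact Or.inr (Or.inr (ends_getLast p _ h (by decide)));
       exact Or.inr (Or.inr (ends_getLast p _ h (by decide)));
       exact Or.inr (Or.inr (ends_getLast p _ h (by decide)))]
  have hI' : p.toList.getLast? = some 'g' ∨ p.toList.getLast? = some 'p' ∨ p.toList.getLast? = some 'f' := by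
    rcases hI with h | h | h | h | h <;>
      [exact Or.inl (ends_getLast p _ h (by decide));
       exact Or.inl (ends_getLast p _ h (by decide));
       exact Or.inl (ends_getLast p _ h (by decide));
       exact Or.inr (Or.inl (ends_getLast p _ h (by decide)));
       exact Or.inr (Or.inr (ends_getLast p _ h (by decide)))]
  rcases hV' with h1 | h1 | h1 <;> rcases hI' with h2 | h2 | h2 <;> simp [h1] at h2

theorem modV (v i o t : Int) :
    (((PySem.Dict.mk [("video", v), ("image", i), ("other", o), ("total", t)]).modify "video" 0 (· + 1)).modify "total" 0 (· + 1))
    = PySem.Dict.mk [("video", v + 1), ("image", i), ("other", o), ("total", t + 1)] := by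
  simp [PySem.Dict.modify, PySem.Dict.contains, PySem.Dict.insert, PySem.Dict.getD, PySem.Dict.get?]

theorem modI (v i o t : Int) :
    (((PySem.Dict.mk [("video", v), ("image", i), ("other", o), ("total", t)]).modify "image" 0 (· + 1)).modify "total" 0 (· + 1))
    = PySem.Dict.mk [("video", v), ("image", i + 1), ("other", o), ("total", t + 1)] := by
  simp [PySem.Dict.modify, PySem.Dict.contains, PySem.Dict.insert, PySem.Dict.getD, PySem.Dict.get?]

theorem modO (v i o t : Int) :
    (((PySem.Dict.mk [("video", v), ("image", i), ("other", o), ("total", t)]).modify "other" 0 (· + 1)).modify "total" 0 (· + 1))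
    = PySem.Dict.mk [("video", v), ("image", i), ("other", o + 1), ("total", t + 1)] := by
  simp [PySem.Dict.modify, PySem.Dict.contains, PySem.Dict.insert, PySem.Dict.getD, PySem.Dict.get?]

-- loop invariant: A's fold produces the direct suffix-match counts and the complement,
-- using disjVI to fold the "image" ladder branch into a plain image-suffix count
theorem foldl_step (l : List (List (String × String))) (v i o t : Int) :
    (l.foldl (fun c it =>
      let url := ((PySem.Dict.mk it).get? "url").getD ""
      let t' := media_type_from_url url
      let c :=
        if t' == "video" then c.modify "video" 0 (· + 1)
        else if t' == "image" then c.modify "image" 0 (· + 1)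
        else c.modify "other" 0 (· + 1)
      c.modify "total" 0 (· + 1))
      (PySem.Dict.mk [("video", v), ("image", i), ("other", o), ("total", t)])).items
    = [("video", v + ((l.map pathOf).countP isV : Nat)),
       ("image", i + ((l.map pathOf).countP isI : Nat)),
       ("other", o + ((l.length : Int) - ((l.map pathOf).countP isV : Nat) - ((l.map pathOf).countP isI : Nat))),
       ("total", t + l.length)] := by
  induction l generalizing v i o t with
  | nil => simp
  | cons hd tl ih =>
    simp only [List.foldl_cons]
    have hmedia := media_eq (((PySem.Dict.mk hd).get? "url").getD "")
    have hpath : (((PySem.Str.splitMax? (PySem.Str.lower (((PySem.Dict.mk hd).get? "url").getD "")) "?" 1).getD []).headD "") = pathOf hd := rfl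
    rw [hpath] at hmedia
    by_cases hv : isV (pathOf hd) = true
    · have hi : isI (pathOf hd) = false := disjVI _ hv
      rw [hmedia]
      simp only [hv, if_true, beq_self_eq_true, if_true, modV]
      rw [ih]
      simp only [List.map_cons, List.countP_cons, List.length_cons, hv, hi,
        reduceIte, List.cons.injEq, Prod.mk.injEq, true_and, and_true]
      and_intros <;> push_cast <;> ring
    · rw [Bool.not_eq_true] at hv
      by_cases hi : isI (pathOf hd) = true
      · rw [hmedia]
        simp only [hv, Bool.false_eq_true, if_false, hi, if_true]
        simp only [show (("image" : String) == "video") = false from by decide,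
          Bool.false_eq_true, if_false, beq_self_eq_true, if_true, modI]
        rw [ih]
        simp only [List.map_cons, List.countP_cons, List.length_cons, hv, hi,
          reduceIte, List.cons.injEq, Prod.mk.injEq, true_and, and_true]
        and_intros <;> push_cast <;> ring
      · rw [Bool.not_eq_true] at hi
        rw [hmedia]
        simp only [hv, Bool.false_eq_true, if_false, hi]
        simp only [show (("other" : String) == "video") = false from by decide,
          show (("other" : String) == "image") = false from by decide,
          Bool.false_eq_true, if_false, modO]
        rw [ih]
        simp only [List.map_cons, List.countP_cons, List.length_cons, hv, hi,
          List.cons.injEq, Prod.mk.injEq, true_and, and_true]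
        and_intros <;> push_cast <;> ring

-- ===== VERDICT (by name: the statement is the Claim_ definition above) =====
theorem split_counts_by_url_spec : Claim_equal_split_counts_by_url := by
  intro items _
  unfold Spec_split_counts_by_url split_counts_by_url split_counts_by_url_alt
  rw [show PySem.Dict.ofList [("video", (0:Int)), ("image", 0), ("other", 0), ("total", 0)]
      = PySem.Dict.mk [("video", 0), ("image", 0), ("other", 0), ("total", 0)] from by decide]
  rw [foldl_step]
  simp only [List.length_map, zero_add]
  rfl
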